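-- pv_equiv track=rewrite | github.com/hippie-cycling/CBFT | Gromark_keyfilter.py | create_keyed_alphabet
-- ===== SOURCE A (Python) =====
-- def create_keyed_alphabet(keyword):
--     """Create a keyed alphabet from a keyword following Gromark cipher rules"""
--     # Remove duplicates while preserving order
--     seen = set()
--     keyword_unique = ''.join(c for c in keyword.upper() if not (c in seen or seen.add(c)))
--
--     # Add remaining alphabet letters
--     remaining = ''.join(c for c in 'ABCDEFGHIJKLMNOPQRSTUVWXYZ' if c not in keyword_unique)
--     keyed_base = keyword_unique + remaining
--
--     # Create transposition block
--     cols = len(keyword)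
--     rows = (len(keyed_base) + cols - 1) // cols
--     block = [['' for _ in range(cols)] for _ in range(rows)]
--
--     # Fill the block row by row
--     idx = 0
--     for i in range(rows):
--         for j in range(cols):
--             if idx < len(keyed_base):
--                 block[i][j] = keyed_base[idx]
--                 idx += 1
--
--     # Get column order based on keyword
--     sorted_chars = sorted(keyword)
--     order = []
--     for char in keyword:
--         order.append(sorted_chars.index(char) + 1)
--         sorted_chars[sorted_chars.index(char)] = None
--
--     # Create pairs of (order number, column index)
--     pairs = list(enumerate(order))
--     pairs.sort(key=lambda x: x[1])
--     col_order = [p[0] for p in pairs]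
--
--     # Create mixed alphabet by reading down columns in the determined order
--     mixed_alphabet = ''
--     for col in col_order:
--         for row in range(rows):
--             if row < len(block) and block[row][col]:
--                 mixed_alphabet += block[row][col]
--
--     return mixed_alphabet
-- ===== SOURCE B (Python) =====
-- def create_keyed_alphabet(keyword):
--     """Create a keyed alphabet from a keyword following Gromark cipher rules"""
--     # Keyed base: first occurrences of uppercased keyword, then the rest of the alphabet
--     keyed_base = ''.join(dict.fromkeys(keyword.upper() + 'ABCDEFGHIJKLMNOPQRSTUVWXYZ'))
--     cols = len(keyword)
--     # Column order = argsort of the keyword, ties broken by position, via ONE sort with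
--     # an injective integer key (ord(ch)*cols + i encodes the pair (ch, i) lexicographically).
--     col_order = sorted(range(cols), key=lambda i: ord(keyword[i]) * cols + i)
--     # Read each column straight out of keyed_base with a stride slice.
--     return ''.join(keyed_base[c::cols] for c in col_order)
-- ===== Notes on version B (the rewrite author's own statement) =====
-- stated objective: faster
-- what changed: The mutate-and-rescan ranking (sorted copy, repeated list.index, None-ing used slots) is replaced by one argsort: sorted(range(cols), key=lambda i: ord(keyword[i])*cols+i) with an injective integer key, the dedup/remaining construction becomes a single dict.fromkeys over keyword.upper()+alphabet, and the rows x cols matrix build plus nested column read is replaced by stride slices keyed_base[c::cols].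
import Mathlib
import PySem

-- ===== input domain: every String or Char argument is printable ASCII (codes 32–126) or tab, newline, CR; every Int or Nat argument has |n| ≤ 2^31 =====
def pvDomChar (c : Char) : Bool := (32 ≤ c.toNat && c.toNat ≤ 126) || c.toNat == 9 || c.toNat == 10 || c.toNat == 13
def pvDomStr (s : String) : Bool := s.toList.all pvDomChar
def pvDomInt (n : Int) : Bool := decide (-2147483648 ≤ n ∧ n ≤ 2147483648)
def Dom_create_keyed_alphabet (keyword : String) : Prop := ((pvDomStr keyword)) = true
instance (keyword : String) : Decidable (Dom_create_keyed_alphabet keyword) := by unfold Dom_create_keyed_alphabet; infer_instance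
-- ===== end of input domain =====

-- B replaces the quadratic sorted-list/index ranking by one argsort with an injective
-- integer key and reads columns as stride slices instead of building a matrix
-- (different decomposition; asymptotically cheaper ranking).


-- ===== PORT A =====
def pvAlphabet : List Char := "ABCDEFGHIJKLMNOPQRSTUVWXYZ".toList

-- dedup step of A's seen-set comprehension: keep c and add it to seen iff c not in seen
def pvDStep (st : PySem.Set Char × List Char) (c : Char) : PySem.Set Char × List Char :=
  if PySem.Set.contains st.1 c then st else (PySem.Set.add st.1 c, st.2 ++ [c])

-- keyword_unique + remaining (A's construction)
def pvKeyedBaseA (kw : List Char) : List Char :=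
  let keyword_unique := ((PySem.Chars.upper kw).foldl pvDStep (PySem.Set.empty, [])).2
  keyword_unique ++ pvAlphabet.filter (fun c => !(keyword_unique.contains c))

-- the block fill: row-major double loop writing keyed_base into a rows × cols matrix
-- (a cell is [] for Python's '' or a single char)
def pvFill (kb : List Char) (rows cols : Nat) : List (List (List Char)) × Nat :=
  (List.range rows).foldl (fun st i =>
    (List.range cols).foldl (fun (st : List (List (List Char)) × Nat) j =>
      if h : st.2 < kb.length then
        (st.1.modify i (fun r => r.set j [kb[st.2]]), st.2 + 1)
      else st) st)
    (List.replicate rows (List.replicate cols ([] : List Char)), 0)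

-- A's column-order ranking loop: sorted_chars.index(char), append rank+1, blank the slot
def pvOStep (st : List (Option Char) × List Nat) (ch : Char) : List (Option Char) × List Nat :=
  -- sorted_chars.index(char) (called twice, as in the Python): always succeeds,
  -- since sorted_chars starts as a permutation of kw; getD 0 is never the fallback
  (st.1.set ((PySem.List.index? st.1 (some ch)).getD 0) none,
   st.2 ++ [(PySem.List.index? st.1 (some ch)).getD 0 + 1])

def pvColOrder (kw : List Char) : List Int :=
  let order := (kw.foldl pvOStep ((PySem.List.sorted kw (fun c => c) false).map some, [])).2
  let pairs := PySem.List.enumerate order 0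
  (PySem.List.sorted pairs (fun p => p.2) false).map (fun p => p.1)

def create_keyed_alphabet (keyword : String) : String :=
  let kw := keyword.toList
  let keyed_base := pvKeyedBaseA kw
  let cols := kw.length
  let rows := (keyed_base.length + cols - 1) / cols  -- Python '//' on nonnegative ints; cols = 0 raises (outside Pre_)
  let block := (pvFill keyed_base rows cols).1
  String.ofList ((pvColOrder kw).foldl (fun acc col =>
    (List.range rows).foldl (fun acc row =>
      let cell := PySem.List.pyGetD (block.getD row []) col ([] : List Char)  -- block[row][col]; always in range
      if row < block.length ∧ cell ≠ [] then acc ++ cell else acc) acc) [])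

-- ===== PORT B =====
-- ''.join(dict.fromkeys(keyword.upper() + alphabet))
def pvKeyedBaseB (kw : List Char) : List Char :=
  PySem.List.dedup (PySem.Chars.upper kw ++ pvAlphabet)

-- sorted(range(cols), key=lambda i: ord(keyword[i]) * cols + i)
-- (keyword[i] is always in range for i in range(cols); the 'A' default is never used)
def pvOrderB (kw : List Char) : List Int :=
  PySem.List.sorted (PySem.List.pyRange 0 (kw.length : Int) 1)
    (fun i => ((PySem.List.pyGetD kw i 'A').toNat : Int) * (kw.length : Int) + i) false

def create_keyed_alphabet_alt (keyword : String) : String :=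
  let kw := keyword.toList
  let keyed_base := pvKeyedBaseB kw
  let cols := kw.length
  -- ''.join(keyed_base[c::cols] for c in col_order); step cols ≠ 0 whenever the loop runs
  String.ofList ((pvOrderB kw).foldl
    (fun acc c => acc ++ (PySem.List.slice? keyed_base (some c) none (cols : Int)).getD []) [])

-- ===== PRECONDITION & SPEC =====
-- Pre_ excludes only the empty keyword, on which the Python A raises ZeroDivisionError (cols = 0).
def Pre_create_keyed_alphabet (keyword : String) : Prop := keyword ≠ ""
instance (keyword : String) : Decidable (Pre_create_keyed_alphabet keyword) := by
  unfold Pre_create_keyed_alphabet; infer_instance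
def pvWitness_create_keyed_alphabet : String := "GROMARK"

def Spec_create_keyed_alphabet (keyword : String) (out : String) : Prop := out = create_keyed_alphabet_alt keyword
instance (keyword : String) (out : String) : Decidable (Spec_create_keyed_alphabet keyword out) := by unfold Spec_create_keyed_alphabet; infer_instance

-- ===== CLAIM (what is proved, stated in full; the proofs are below) =====
def Claim_equal_create_keyed_alphabet : Prop := ∀ (keyword : String), Dom_create_keyed_alphabet keyword → Pre_create_keyed_alphabet keyword → Spec_create_keyed_alphabet keyword (create_keyed_alphabet keyword)

-- ===== LEMMAS AND PROOFS =====

-- the value written in cell (i, j) of the filled block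
def pvCell (kb : List Char) (cols i j : Nat) : List Char :=
  if h : i * cols + j < kb.length then [kb[i * cols + j]] else []

def pvRow (kb : List Char) (cols i : Nat) : List (List Char) :=
  (List.range cols).map (pvCell kb cols i)

-- A's sorted keyword copy, the rank a keyword position receives, and the Option-list
-- state of A's ranking loop after t steps
def pvSrt (kw : List Char) : List Char := PySem.List.sorted kw (fun c => c) false

def pvRk (kw : List Char) (i : Nat) : Nat :=
  kw.countP (fun c => decide (c < kw.getD i 'A')) + (kw.take i).count (kw.getD i 'A')

def pvMst (kw : List Char) (t : Nat) : List (Option Char) :=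
  (List.range kw.length).map (fun r =>
    if r < kw.countP (fun x => decide (x < (pvSrt kw).getD r 'A'))
          + (kw.take t).count ((pvSrt kw).getD r 'A')
    then none else some ((pvSrt kw).getD r 'A'))

-- A's seen-set dedup keeps seen = out, so it is Set.update
lemma pv_dstep_pair (l : List Char) : ∀ (s : PySem.Set Char),
    l.foldl pvDStep (s, s) = (PySem.Set.update s l, PySem.Set.update s l) := by
  induction l with
  | nil => intro s; simp [PySem.Set.update]
  | cons c l ih =>
    intro s
    have hstep : pvDStep (s, s) c = (PySem.Set.add s c, PySem.Set.add s c) := by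
      simp only [pvDStep, PySem.Set.add]
      split <;> rfl
    have hupd : PySem.Set.update s (c :: l) = PySem.Set.update (PySem.Set.add s c) l := by
      simp [PySem.Set.update]
    simp only [List.foldl_cons, hstep, ih, hupd]

-- the two keyed bases agree
lemma pv_kb_eq (kw : List Char) : pvKeyedBaseA kw = pvKeyedBaseB kw := by
  have he : (PySem.Set.empty : PySem.Set Char) = [] := rfl
  have h1 := pv_dstep_pair (PySem.Chars.upper kw) ([] : PySem.Set Char)
  have halpha : PySem.Set.ofList pvAlphabet = pvAlphabet := by
    apply PySem.Set.ofList_eq_self_of_nodup; decide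
  simp only [pvKeyedBaseA, pvKeyedBaseB, PySem.List.dedup_eq_ofList,
    PySem.Set.ofList_append, he, h1, PySem.Set.update_nil_left]
  rw [PySem.Set.update_eq_append_filter, halpha]
  rfl

lemma pv_set_range_map {α : Type} (f : Nat → α) (c m : Nat) (v : α) :
    ((List.range c).map f).set m v = (List.range c).map (fun j => if j = m then v else f j) := by
  apply List.ext_getElem?
  intro i
  by_cases hi : i < c
  · simp only [List.getElem?_set, List.length_map, List.length_range,
      List.getElem?_map, List.getElem?_range, hi]
    by_cases h : m = i
    · subst h; simp [hi]
    · simp [h, Ne.symm h]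
  · have h1 : ((List.range c).map f).length ≤ i := by simp; omega
    have h2 : ((List.range c).map (fun j => if j = m then v else f j)).length ≤ i := by simp; omega
    rw [List.getElem?_eq_none h2, List.getElem?_set]
    simp only [List.length_map, List.length_range]
    rw [List.getElem?_eq_none h1]
    split <;> simp_all

lemma pv_set_modify {α : Type} (l : List α) (i : Nat) (r : α) (f : α → α) :
    (l.set i r).modify i f = l.set i (f r) := by
  apply List.ext_getElem?
  intro j
  rw [List.getElem?_modify]
  by_cases h : i = j
  · subst h
    simp only [List.getElem?_set]
    by_cases hl : i < l.length <;> simp [hl]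
  · simp only [List.getElem?_set, if_neg h]
    cases l[j]? <;> simp

lemma pv_set_self {α : Type} (l : List α) (i : Nat) (v : α) (h : l[i]? = some v) :
    l.set i v = l := by
  have hi : i < l.length := by
    by_contra hi
    rw [List.getElem?_eq_none (by omega)] at h
    simp at h
  apply List.ext_getElem?
  intro j
  rw [List.getElem?_set]
  by_cases hij : i = j
  · subst hij; rw [if_pos rfl, if_pos hi, h]
  · rw [if_neg hij]

lemma pv_fill_inner (kb : List Char) (cols R : Nat) (bl : List (List (List Char)))
    (hbl : bl[R]? = some (List.replicate cols ([] : List Char))) :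
    ∀ m, m ≤ cols →
    (List.range m).foldl (fun (st : List (List (List Char)) × Nat) j =>
        if h : st.2 < kb.length then
          (st.1.modify R (fun r => r.set j [kb[st.2]]), st.2 + 1)
        else st) (bl, min (R * cols) kb.length)
      = (bl.set R ((List.range cols).map (fun j => if j < m then pvCell kb cols R j else [])),
         min (R * cols + m) kb.length) := by
  intro m
  induction m with
  | zero =>
    intro _
    rw [List.range_zero, List.foldl_nil]
    have hrow : (List.range cols).map (fun j => if j < 0 then pvCell kb cols R j else [])
        = List.replicate cols [] := by
      rw [show (fun j => if j < 0 then pvCell kb cols R j else []) = fun _ : Nat => ([] : List Char)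
            from funext fun j => by simp]
      simp [List.map_const']
    rw [hrow, pv_set_self bl R _ hbl, Nat.add_zero]
  | succ m ih =>
    intro hm
    rw [List.range_succ, List.foldl_append, ih (by omega), List.foldl_cons, List.foldl_nil]
    by_cases h : R * cols + m < kb.length
    · have hmin : min (R * cols + m) kb.length = R * cols + m := by omega
      simp only [hmin]
      rw [dif_pos h]
      refine Prod.ext ?_ (by simp; omega)
      simp only
      rw [pv_set_modify, pv_set_range_map]
      apply congrArg (bl.set R)
      apply List.map_congr_left
      intro j hj
      by_cases hjm : j = m
      · subst hjm
        rw [if_pos rfl, if_pos (by omega), pvCell, dif_pos h]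
      · rw [if_neg hjm]
        by_cases hjl : j < m
        · rw [if_pos hjl, if_pos (by omega)]
        · rw [if_neg hjl, if_neg (by omega)]
    · have hmin : min (R * cols + m) kb.length = min (R * cols + (m + 1)) kb.length := by omega
      rw [dif_neg (by simp; omega)]
      refine Prod.ext ?_ (by simp; omega)
      simp only
      apply congrArg (bl.set R)
      apply List.map_congr_left
      intro j hj
      by_cases hjm : j = m
      · subst hjm
        rw [if_neg (by omega), if_pos (by omega), pvCell, dif_neg h]
      · by_cases hjl : j < m
        · rw [if_pos hjl, if_pos (by omega)]
        · rw [if_neg hjl, if_neg (by omega)]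

lemma pv_fill_eq (kb : List Char) (rows cols : Nat) :
    (pvFill kb rows cols).1 = (List.range rows).map (pvRow kb cols) := by
  have main : ∀ R, R ≤ rows →
      (List.range R).foldl (fun st i =>
        (List.range cols).foldl (fun (st : List (List (List Char)) × Nat) j =>
          if h : st.2 < kb.length then
            (st.1.modify i (fun r => r.set j [kb[st.2]]), st.2 + 1)
          else st) st)
        (List.replicate rows (List.replicate cols ([] : List Char)), 0)
      = ((List.range rows).map
           (fun i => if i < R then pvRow kb cols i else List.replicate cols []),
         min (R * cols) kb.length) := by
    intro R
    induction R with
    | zero =>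
      intro _
      rw [List.range_zero, List.foldl_nil]
      refine Prod.ext ?_ (by simp)
      simp only
      rw [show (fun i => if i < 0 then pvRow kb cols i else List.replicate cols ([] : List Char))
            = fun _ : Nat => List.replicate cols ([] : List Char) from funext fun i => by simp]
      simp [List.map_const']
    | succ R ih =>
      intro hR
      rw [List.range_succ, List.foldl_append, ih (by omega), List.foldl_cons, List.foldl_nil]
      have hbl : ((List.range rows).map
          (fun i => if i < R then pvRow kb cols i else List.replicate cols ([] : List Char)))[R]?
          = some (List.replicate cols ([] : List Char)) := by
        rw [List.getElem?_map, List.getElem?_range (by omega)]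
        simp
      rw [pv_fill_inner kb cols R _ hbl cols le_rfl]
      refine Prod.ext ?_ (by simp only; rw [Nat.succ_mul])
      simp only
      have hrow : (List.range cols).map (fun j => if j < cols then pvCell kb cols R j else [])
          = pvRow kb cols R := by
        apply List.map_congr_left
        intro j hj
        rw [if_pos (List.mem_range.mp hj)]
      rw [hrow, pv_set_range_map]
      apply List.map_congr_left
      intro i hi
      by_cases hiR : i = R
      · subst hiR; rw [if_pos rfl, if_pos (by omega)]
      · rw [if_neg hiR]
        by_cases hil : i < R
        · rw [if_pos hil, if_pos (by omega)]
        · rw [if_neg hil, if_neg (by omega)]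
  rw [pvFill, main rows le_rfl]
  apply List.map_congr_left
  intro i hi
  rw [if_pos (List.mem_range.mp hi)]

-- membership-of-column condition as an index bound
lemma pv_cond_iff (n cols c r : Nat) (hcols : 0 < cols) :
    r * cols + c < n ↔ r < (n - c + cols - 1) / cols := by
  have h1 : r < (n - c + cols - 1) / cols ↔ (r + 1) * cols ≤ n - c + cols - 1 := by
    rw [Nat.lt_iff_add_one_le, Nat.le_div_iff_mul_le hcols]
  rw [h1, add_one_mul]
  generalize r * cols = t
  omega

lemma pv_colA_eq (kb : List Char) (cols c : Nat) (hcols : 0 < cols) (hc : c < cols) :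
    (List.range ((kb.length + cols - 1) / cols)).flatMap (fun r => pvCell kb cols r c)
      = (List.range ((kb.length - c + cols - 1) / cols)).map (fun r => kb.getD (r * cols + c) 'A') := by
  have hmr : (kb.length - c + cols - 1) / cols ≤ (kb.length + cols - 1) / cols :=
    Nat.div_le_div_right (by omega)
  rw [show (kb.length + cols - 1) / cols
        = (kb.length - c + cols - 1) / cols
          + ((kb.length + cols - 1) / cols - (kb.length - c + cols - 1) / cols) by omega,
    List.range_add, List.flatMap_append]
  have h1 : (List.range ((kb.length - c + cols - 1) / cols)).flatMap (fun r => pvCell kb cols r c)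
      = (List.range ((kb.length - c + cols - 1) / cols)).map (fun r => kb.getD (r * cols + c) 'A') :=
    calc (List.range ((kb.length - c + cols - 1) / cols)).flatMap (fun r => pvCell kb cols r c)
        = (List.range ((kb.length - c + cols - 1) / cols)).flatMap
            (fun r => [kb.getD (r * cols + c) 'A']) := by
          apply List.flatMap_congr
          intro r hr
          rw [List.mem_range, ← pv_cond_iff kb.length cols c r hcols] at hr
          rw [pvCell, dif_pos hr, List.getD_eq_getElem kb 'A' hr]
      _ = (List.range ((kb.length - c + cols - 1) / cols)).map
            (fun r => kb.getD (r * cols + c) 'A') := (List.map_eq_flatMap).symm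
  have h2 : (List.map (fun x => (kb.length - c + cols - 1) / cols + x)
        (List.range ((kb.length + cols - 1) / cols - (kb.length - c + cols - 1) / cols))).flatMap
        (fun r => pvCell kb cols r c) = [] := by
    rw [List.flatMap_map]
    apply List.flatMap_eq_nil_iff.mpr
    intro x hx
    have hge : ¬ ((kb.length - c + cols - 1) / cols + x) * cols + c < kb.length := by
      rw [pv_cond_iff kb.length cols c _ hcols]
      omega
    show pvCell kb cols ((kb.length - c + cols - 1) / cols + x) c = []
    rw [pvCell, dif_neg hge]
  rw [h1, h2, List.append_nil]

-- ---- counting helpers and the ranking/argsort correspondence ----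

lemma pv_countP_split (l : List Char) (c : Char) :
    l.countP (fun x => decide (x ≤ c)) = l.countP (fun x => decide (x < c)) + l.count c := by
  induction l with
  | nil => simp
  | cons a l ih =>
    simp only [List.countP_cons, List.count_cons, ih]
    rcases lt_trichotomy a c with h | h | h
    · simp [h, le_of_lt h, ne_of_lt h]; omega
    · subst h; simp; omega
    · simp [not_le.mpr h, not_lt.mpr (le_of_lt h), (ne_of_gt h)]

lemma pv_countP_take_all (s : List Char) (p : Char → Bool) (q : Nat) (hq : q < s.length)
    (hall : ∀ a ∈ s.take (q + 1), p a) : q + 1 ≤ s.countP p := by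
  have h1 : (s.take (q + 1)).countP p = (s.take (q + 1)).length :=
    List.countP_eq_length.mpr hall
  have h2 : (s.take (q + 1)).countP p ≤ s.countP p := (List.take_sublist _ _).countP_le
  rw [h1, List.length_take] at h2
  omega

lemma pv_countP_drop_none (s : List Char) (p : Char → Bool) (q : Nat)
    (hall : ∀ a ∈ s.drop q, ¬ p a) : s.countP p ≤ q := by
  have h0 : s.countP p = (s.take q).countP p + (s.drop q).countP p := by
    rw [← List.countP_append, List.take_append_drop]
  have h1 : (s.drop q).countP p = 0 := List.countP_eq_zero.mpr (by
    intro a ha; exact by simpa using hall a ha)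
  have h2 : (s.take q).countP p ≤ (s.take q).length := List.countP_le_length
  rw [List.length_take] at h2
  omega

lemma pv_srt_len (kw : List Char) : (pvSrt kw).length = kw.length :=
  PySem.List.length_sorted kw _ false

lemma pv_srt_mono (kw : List Char) (p q : Nat) (hpq : p ≤ q) (hq : q < kw.length) :
    (pvSrt kw).getD p 'A' ≤ (pvSrt kw).getD q 'A' := by
  unfold pvSrt
  have hlen := PySem.List.length_sorted kw (fun c : Char => c) false
  rw [List.getD_eq_getElem _ _ (by omega), List.getD_eq_getElem _ _ (by omega)]
  exact PySem.List.sorted_id_getElem_mono kw hpq (by omega)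

lemma pv_srt_countP (kw : List Char) (p : Char → Bool) :
    (pvSrt kw).countP p = kw.countP p :=
  (PySem.List.sorted_perm kw _ false).countP_eq p

lemma pv_take_mem_le (kw : List Char) (q : Nat) (hq : q < kw.length)
    (a : Char) (ha : a ∈ (pvSrt kw).take (q + 1)) : a ≤ (pvSrt kw).getD q 'A' := by
  obtain ⟨i, hi, rfl⟩ := List.getElem_of_mem ha
  rw [List.getElem_take]
  rw [List.length_take] at hi
  have hilen : i < (pvSrt kw).length := by omega
  rw [← List.getD_eq_getElem _ 'A' hilen]
  exact pv_srt_mono kw i q (by omega) hq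

lemma pv_drop_mem_ge (kw : List Char) (q : Nat) (hq : q < kw.length)
    (a : Char) (ha : a ∈ (pvSrt kw).drop q) : (pvSrt kw).getD q 'A' ≤ a := by
  obtain ⟨i, hi, rfl⟩ := List.getElem_of_mem ha
  rw [List.getElem_drop]
  have hlen := pv_srt_len kw
  rw [List.length_drop] at hi
  have h2 : q + i < (pvSrt kw).length := by omega
  rw [← List.getD_eq_getElem _ 'A' h2]
  exact pv_srt_mono kw q (q + i) (by omega) (by omega)

lemma pv_block_lb (kw : List Char) (r : Nat) (hr : r < kw.length) :
    kw.countP (fun x => decide (x < (pvSrt kw).getD r 'A')) ≤ r := by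
  rw [← pv_srt_countP]
  apply pv_countP_drop_none
  intro a ha
  have := pv_drop_mem_ge kw r hr a ha
  simp only [decide_eq_true_eq]
  exact not_lt.mpr this

lemma pv_block_char (kw : List Char) (c : Char) (q : Nat) (hq : q < kw.length)
    (h1 : kw.countP (fun x => decide (x < c)) ≤ q)
    (h2 : q < kw.countP (fun x => decide (x < c)) + kw.count c) :
    (pvSrt kw).getD q 'A' = c := by
  set cq := (pvSrt kw).getD q 'A' with hcq
  rcases lt_trichotomy cq c with h | h | h
  · exfalso
    have : q + 1 ≤ kw.countP (fun x => decide (x < c)) := by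
      rw [← pv_srt_countP]
      apply pv_countP_take_all _ _ _ (by rw [pv_srt_len]; omega)
      intro a ha
      have := pv_take_mem_le kw q hq a ha
      simp only [decide_eq_true_eq]
      exact lt_of_le_of_lt this h
    omega
  · exact h
  · exfalso
    have : kw.countP (fun x => decide (x ≤ c)) ≤ q := by
      rw [← pv_srt_countP]
      apply pv_countP_drop_none
      intro a ha
      have := pv_drop_mem_ge kw q hq a ha
      simp only [decide_eq_true_eq]
      exact not_le.mpr (lt_of_lt_of_le h this)
    rw [pv_countP_split] at this
    omega

lemma pv_take_succ_count (kw : List Char) (t : Nat) (ht : t < kw.length) (c : Char) :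
    (kw.take (t + 1)).count c
      = (kw.take t).count c + (if kw.getD t 'A' = c then 1 else 0) := by
  rw [List.take_add_one, List.getElem?_eq_getElem ht]
  simp only [Option.toList_some, List.count_append]
  rw [List.getD_eq_getElem _ _ ht]
  by_cases h : kw[t] = c
  · simp [h]
  · simp [h]

lemma pv_rk_ub (kw : List Char) (t : Nat) (ht : t < kw.length) :
    pvRk kw t < kw.countP (fun x => decide (x < kw.getD t 'A')) + kw.count (kw.getD t 'A') := by
  unfold pvRk
  have h1 : (kw.take (t + 1)).count (kw.getD t 'A') ≤ kw.count (kw.getD t 'A') :=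
    (List.take_sublist _ _).count_le _
  rw [pv_take_succ_count kw t ht, if_pos rfl] at h1
  omega

lemma pv_rk_lt_len (kw : List Char) (t : Nat) (ht : t < kw.length) : pvRk kw t < kw.length := by
  have h1 := pv_rk_ub kw t ht
  have h2 : kw.countP (fun x => decide (x < kw.getD t 'A')) + kw.count (kw.getD t 'A')
      ≤ kw.length := by
    rw [← pv_countP_split]
    exact List.countP_le_length
  omega

lemma pv_mst_zero (kw : List Char) : pvMst kw 0 = (pvSrt kw).map some := by
  unfold pvMst
  have hlen := pv_srt_len kw
  apply List.ext_getElem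
  · simp [hlen]
  · intro i h1 h2
    simp only [List.getElem_map, List.getElem_range]
    rw [List.take_zero]
    simp only [List.count_nil, Nat.add_zero]
    have hi : i < kw.length := by simpa using h1
    have hlb := pv_block_lb kw i hi
    rw [if_neg (by omega)]
    rw [List.getD_eq_getElem _ _ (by omega)]

lemma pv_mst_getElem (kw : List Char) (t r : Nat) (hr : r < kw.length) :
    (pvMst kw t)[r]'(by simp [pvMst]; omega)
      = if r < kw.countP (fun x => decide (x < (pvSrt kw).getD r 'A'))
            + (kw.take t).count ((pvSrt kw).getD r 'A')
        then none else some ((pvSrt kw).getD r 'A') := by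
  simp [pvMst]

lemma pv_index_mst (kw : List Char) (t : Nat) (ht : t < kw.length) :
    PySem.List.index? (pvMst kw t) (some (kw.getD t 'A')) = some (pvRk kw t) := by
  have hlen : (pvMst kw t).length = kw.length := by simp [pvMst]
  have hrk := pv_rk_lt_len kw t ht
  have hrkub := pv_rk_ub kw t ht
  show List.idxOf? (some (kw.getD t 'A')) (pvMst kw t) = some (pvRk kw t)
  rw [List.idxOf?_eq_some_iff]
  refine ⟨by omega, ?_, ?_⟩
  · rw [pv_mst_getElem kw t (pvRk kw t) hrk]
    have hchar : (pvSrt kw).getD (pvRk kw t) 'A' = kw.getD t 'A' := by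
      apply pv_block_char kw (kw.getD t 'A') (pvRk kw t) hrk
      · unfold pvRk; omega
      · exact hrkub
    rw [hchar, if_neg (by unfold pvRk; omega)]
  · intro j hj hcontra
    rw [pv_mst_getElem kw t j (by omega)] at hcontra
    by_cases hcond : j < kw.countP (fun x => decide (x < (pvSrt kw).getD j 'A'))
        + (kw.take t).count ((pvSrt kw).getD j 'A')
    · rw [if_pos hcond] at hcontra; simp at hcontra
    · rw [if_neg hcond] at hcontra
      have hcj : (pvSrt kw).getD j 'A' = kw.getD t 'A' := by injection hcontra
      rw [hcj] at hcond
      unfold pvRk at hj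
      omega

lemma pv_mst_succ (kw : List Char) (t : Nat) (ht : t < kw.length) :
    (pvMst kw t).set (pvRk kw t) none = pvMst kw (t + 1) := by
  have hrk := pv_rk_lt_len kw t ht
  have hrkub := pv_rk_ub kw t ht
  unfold pvMst
  rw [pv_set_range_map]
  apply List.map_congr_left
  intro r hrmem
  have hr : r < kw.length := List.mem_range.mp hrmem
  have hcnt := pv_take_succ_count kw t ht ((pvSrt kw).getD r 'A')
  by_cases hreq : r = pvRk kw t
  · rw [if_pos hreq]
    have hchar : (pvSrt kw).getD r 'A' = kw.getD t 'A' := by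
      rw [hreq]
      apply pv_block_char kw (kw.getD t 'A') (pvRk kw t) hrk
      · unfold pvRk; omega
      · exact hrkub
    rw [hcnt, hchar, if_pos rfl]
    have hre : r = kw.countP (fun x => decide (x < kw.getD t 'A'))
        + (kw.take t).count (kw.getD t 'A') := by
      rw [hreq]; unfold pvRk; rfl
    rw [if_pos (by omega)]
  · rw [if_neg hreq]
    by_cases hcc : (pvSrt kw).getD r 'A' = kw.getD t 'A'
    · rw [hcnt, hcc, if_pos rfl]
      have hrne : r ≠ kw.countP (fun x => decide (x < kw.getD t 'A'))
          + (kw.take t).count (kw.getD t 'A') := by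
        unfold pvRk at hreq
        exact hreq
      by_cases hlt : r < kw.countP (fun x => decide (x < kw.getD t 'A'))
          + (kw.take t).count (kw.getD t 'A')
      · rw [if_pos hlt, if_pos (by omega)]
      · rw [if_neg hlt, if_neg (by omega)]
    · have hne : ¬ (kw.getD t 'A' = (pvSrt kw).getD r 'A') := fun hh => hcc hh.symm
      rw [hcnt, if_neg hne, Nat.add_zero]

lemma pv_ord_inv (kw : List Char) : ∀ t, t ≤ kw.length →
    (kw.take t).foldl pvOStep ((pvSrt kw).map some, [])
      = (pvMst kw t, (List.range t).map (fun i => pvRk kw i + 1)) := by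
  intro t
  induction t with
  | zero => intro _; rw [List.take_zero, List.foldl_nil, pv_mst_zero]; simp
  | succ t ih =>
    intro ht
    obtain ⟨x, hxeq⟩ : ∃ x, kw[t]? = some x := ⟨kw[t], List.getElem?_eq_getElem (by omega)⟩
    have hgd : kw.getD t 'A' = x := by rw [List.getD_eq_getElem?_getD, hxeq]; rfl
    rw [List.take_add_one, hxeq, Option.toList_some,
      List.foldl_append, ih (by omega), List.foldl_cons, List.foldl_nil]
    have hidx : PySem.List.index? (pvMst kw t) (some x) = some (pvRk kw t) := by
      rw [← hgd]; exact pv_index_mst kw t (by omega)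
    simp only [pvOStep]
    rw [hidx, Option.getD_some, pv_mst_succ kw t (by omega),
      List.range_succ, List.map_append]
    simp

lemma pv_order_eq (kw : List Char) :
    (kw.foldl pvOStep ((pvSrt kw).map some, [])).2
      = (List.range kw.length).map (fun i => pvRk kw i + 1) := by
  have h := pv_ord_inv kw kw.length le_rfl
  rw [List.take_length] at h
  rw [h]

lemma pv_rk_lex (kw : List Char) (i j : Nat) (hi : i < kw.length) (_hj : j < kw.length)
    (h : kw.getD i 'A' < kw.getD j 'A' ∨ (kw.getD i 'A' = kw.getD j 'A' ∧ i < j)) :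
    pvRk kw i < pvRk kw j := by
  rcases h with h | ⟨heq, hij⟩
  · have h1 := pv_rk_ub kw i hi
    have h2 : kw.countP (fun x => decide (x < kw.getD i 'A')) + kw.count (kw.getD i 'A')
        ≤ kw.countP (fun x => decide (x < kw.getD j 'A')) := by
      rw [← pv_countP_split]
      apply List.countP_mono_left
      intro x _ hx
      simp only [decide_eq_true_eq] at hx ⊢
      exact lt_of_le_of_lt hx h
    have h3 : kw.countP (fun x => decide (x < kw.getD j 'A')) ≤ pvRk kw j := by
      unfold pvRk; omega
    omega
  · have hcnt : (kw.take (i + 1)).count (kw.getD i 'A') ≤ (kw.take j).count (kw.getD i 'A') :=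
      ((List.take_prefix_take_left (by omega : i + 1 ≤ j)).sublist).count_le _
    rw [pv_take_succ_count kw i hi, if_pos rfl] at hcnt
    unfold pvRk
    rw [← heq]
    omega

lemma pv_char_lt_iff (a b : Char) : a < b ↔ a.toNat < b.toNat := by
  rw [Char.lt_def, UInt32.lt_iff_toNat_lt]; rfl

lemma pv_char_eq_of_toNat (a b : Char) (h : a.toNat = b.toNat) : a = b :=
  Char.ext (UInt32.toNat_inj.mp h)

lemma pv_key_lex (kw : List Char) (a b : Int)
    (ha0 : 0 ≤ a) (ha : a < (kw.length : Int)) (hb0 : 0 ≤ b) (hb : b < (kw.length : Int))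
    (hne : a ≠ b)
    (hk : ((PySem.List.pyGetD kw a 'A').toNat : Int) * (kw.length : Int) + a
        ≤ ((PySem.List.pyGetD kw b 'A').toNat : Int) * (kw.length : Int) + b) :
    pvRk kw a.toNat < pvRk kw b.toNat := by
  have hca : PySem.List.pyGetD kw a 'A' = kw.getD a.toNat 'A' := by
    conv_lhs => rw [show a = ((a.toNat : Nat) : Int) from (Int.toNat_of_nonneg ha0).symm]
    rw [PySem.List.pyGetD_natCast]
  have hcb : PySem.List.pyGetD kw b 'A' = kw.getD b.toNat 'A' := by
    conv_lhs => rw [show b = ((b.toNat : Nat) : Int) from (Int.toNat_of_nonneg hb0).symm]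
    rw [PySem.List.pyGetD_natCast]
  rw [hca, hcb] at hk
  set ca := kw.getD a.toNat 'A' with hcadef
  set cb := kw.getD b.toNat 'A' with hcbdef
  have han : a.toNat < kw.length := by omega
  have hbn : b.toNat < kw.length := by omega
  rcases lt_trichotomy ca.toNat cb.toNat with hc | hc | hc
  · exact pv_rk_lex kw a.toNat b.toNat han hbn (Or.inl ((pv_char_lt_iff ca cb).mpr hc))
  · have hcc : ca = cb := pv_char_eq_of_toNat ca cb hc
    rw [hcc] at hk
    exact pv_rk_lex kw a.toNat b.toNat han hbn (Or.inr ⟨hcc, by omega⟩)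
  · exfalso
    have h1 : ((cb.toNat : Int) + 1) * (kw.length : Int) ≤ (ca.toNat : Int) * (kw.length : Int) := by
      apply mul_le_mul_of_nonneg_right _ (by positivity)
      exact_mod_cast hc
    linarith [hk, h1, ha0, hb]

lemma pv_colOrder_eq (kw : List Char) : pvColOrder kw = pvOrderB kw := by
  unfold pvColOrder
  rw [show PySem.List.sorted kw (fun c : Char => c) false = pvSrt kw from rfl, pv_order_eq]
  set n := kw.length with hn
  set order := (List.range n).map (fun i => pvRk kw i + 1) with horder
  have hlenord : order.length = n := by simp [horder]
  have henum : PySem.List.enumerate order 0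
      = (PySem.List.pyRange 0 (n : Int) 1).map (fun j => (j, PySem.List.pyGetD order j 0)) := by
    rw [PySem.List.enumerate_eq_map_pyRange order 0, PySem.List.len_eq, hlenord]
  set ys := (pvOrderB kw).map (fun i : Int => (i, pvRk kw i.toNat + 1)) with hys
  have hp1 : (pvOrderB kw).Perm (PySem.List.pyRange 0 (n : Int) 1) :=
    PySem.List.sorted_perm _ _ _
  have hperm : ys.Perm ((PySem.List.pyRange 0 (n : Int) 1).map
      (fun j => (j, PySem.List.pyGetD order j 0))) := by
    refine (hp1.map _).trans (List.Perm.of_eq ?_)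
    apply List.map_congr_left
    intro j hj
    obtain ⟨hj0, hjn, -⟩ := (PySem.List.mem_pyRange_iff_of_pos (by norm_num) j).mp hj
    have hjc : j = ((j.toNat : Nat) : Int) := (Int.toNat_of_nonneg hj0).symm
    refine congrArg (fun z => (j, z)) ?_
    conv_rhs => rw [hjc]
    rw [PySem.List.pyGetD_natCast, horder, PySem.List.getD_map_range _ _ _ _ (by omega)]
  have hnd : (pvOrderB kw).Nodup := by
    rw [List.Perm.nodup_iff hp1, PySem.List.pyRange_zero_nat]
    exact (List.nodup_range).map (fun a b => by exact_mod_cast id)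
  have hple : (pvOrderB kw).Pairwise (fun a b =>
      ((PySem.List.pyGetD kw a 'A').toNat : Int) * (n : Int) + a
        ≤ ((PySem.List.pyGetD kw b 'A').toNat : Int) * (n : Int) + b) :=
    PySem.List.sorted_pairwise _ _
  have hpair : ys.Pairwise (fun p q => p.2 < q.2) := by
    rw [hys, List.pairwise_map]
    refine List.Pairwise.imp_of_mem ?_ (hple.and hnd)
    intro a b hma hmb hab
    obtain ⟨ha0, han, -⟩ := (PySem.List.mem_pyRange_iff_of_pos (by norm_num) a).mp
      (hp1.subset hma)
    obtain ⟨hb0, hbn, -⟩ := (PySem.List.mem_pyRange_iff_of_pos (by norm_num) b).mp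
      (hp1.subset hmb)
    have := pv_key_lex kw a b ha0 (by omega) hb0 (by omega) hab.2 hab.1
    omega
  have hs := PySem.List.sorted_eq_of_perm_of_pairwise_lt _ ys (fun p => p.2) (henum ▸ hperm) hpair
  show ((PySem.List.sorted (PySem.List.enumerate order) fun p => p.2).map (fun p => p.1))
      = pvOrderB kw
  rw [hs, hys, List.map_map]
  exact List.map_id _

lemma pv_slice_col (kb : List Char) (c cols : Nat) (hcols : 0 < cols) :
    PySem.List.slice? kb (some (c : Int)) none (cols : Int)
      = some ((List.range ((kb.length - c + cols - 1) / cols)).map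
          (fun r => kb.getD (c + cols * r) 'A')) := by
  have hlt : ¬ ((cols : Int) < 0) := not_lt.mpr (Int.natCast_nonneg _)
  have hc0 : ¬ ((c : Int) < 0) := not_lt.mpr (Int.natCast_nonneg _)
  have hpos : (0 : Int) < (cols : Int) := by exact_mod_cast hcols
  rw [PySem.List.slice?, PySem.List.sliceIndices]
  rw [if_neg (by exact_mod_cast hcols.ne')]
  simp only [if_neg hlt, if_neg hc0, if_pos hpos]
  by_cases hcl : c ≤ kb.length
  · have hmin : min ((c : Nat) : Int) ((kb.length : Nat) : Int) = (c : Int) := by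
      rw [min_eq_left (by exact_mod_cast hcl)]
    rw [hmin]
    have hcount : (if (c : Int) < (kb.length : Int) then
          ((((kb.length : Nat) : Int) - (c : Int) + (cols : Int) - 1) / (cols : Int)).toNat else 0)
        = (kb.length - c + cols - 1) / cols := by
      by_cases hce : c = kb.length
      · subst hce
        rw [if_neg (by omega)]
        rw [show kb.length - kb.length + cols - 1 = cols - 1 by omega]
        rw [Nat.div_eq_of_lt (by omega)]
      · rw [if_pos (by exact_mod_cast (by omega : c < kb.length))]
        rw [show ((kb.length : Nat) : Int) - (c : Int) + (cols : Int) - 1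
              = ((kb.length - c + cols - 1 : Nat) : Int) by omega]
        rw [← Int.natCast_div, Int.toNat_natCast]
    rw [hcount]
    refine congrArg some ?_
    have hmap : ∀ k ∈ List.range ((kb.length - c + cols - 1) / cols),
        kb[((c : Int) + (cols : Int) * (k : Int)).toNat]? = some (kb.getD (c + cols * k) 'A') := by
      intro k hk
      rw [List.mem_range, ← pv_cond_iff kb.length cols c k hcols] at hk
      have hcast : (c : Int) + (cols : Int) * (k : Int) = ((c + cols * k : Nat) : Int) := by
        push_cast; ring
      have hidx : ((c : Int) + (cols : Int) * (k : Int)).toNat = c + cols * k := by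
        rw [hcast, Int.toNat_natCast]
      have hklen : c + cols * k < kb.length := by rw [Nat.mul_comm cols k]; omega
      rw [hidx, List.getElem?_eq_getElem hklen, List.getD_eq_getElem _ _ hklen]
    rw [List.filterMap_congr hmap,
      show (fun k => some (kb.getD (c + cols * k) 'A'))
            = some ∘ (fun k => kb.getD (c + cols * k) 'A') from rfl,
      List.filterMap_eq_map]
  · have hmin : min ((c : Nat) : Int) ((kb.length : Nat) : Int) = ((kb.length : Nat) : Int) := by
      rw [min_eq_right (by exact_mod_cast (by omega : kb.length ≤ c))]
    rw [hmin, if_neg (by omega)]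
    rw [show kb.length - c + cols - 1 = cols - 1 by omega, Nat.div_eq_of_lt (by omega)]
    simp

-- ===== VERDICT (by name: the statement is the Claim_ definition above) =====
theorem create_keyed_alphabet_spec : Claim_equal_create_keyed_alphabet := by
  intro keyword hdom hpre
  unfold Spec_create_keyed_alphabet
  have hkwne : keyword.toList ≠ [] := by
    simpa [String.toList_eq_nil_iff] using hpre
  have hcols : 0 < keyword.toList.length := List.length_pos_of_ne_nil hkwne
  simp only [create_keyed_alphabet, create_keyed_alphabet_alt]
  rw [pv_kb_eq, pv_colOrder_eq]
  apply congrArg String.ofList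
  apply PySem.List.foldl_congr_mem
  intro acc col hcol
  have hmem : col ∈ PySem.List.pyRange 0 (keyword.toList.length : Int) 1 := by
    rw [← PySem.List.mem_sorted (key := fun i : Int =>
      ((PySem.List.pyGetD keyword.toList i 'A').toNat : Int) * (keyword.toList.length : Int) + i)
      (rev := false)]
    exact hcol
  obtain ⟨hc0, hclt', -⟩ := (PySem.List.mem_pyRange_iff_of_pos (by norm_num) col).mp hmem
  have hclt : col.toNat < keyword.toList.length := by omega
  set kw := keyword.toList
  set kb := pvKeyedBaseB kw with hkb
  set cols := kw.length with hcolsdef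
  set rows := (kb.length + cols - 1) / cols with hrows
  set c := col.toNat with hcdef
  rw [pv_fill_eq kb rows cols]
  have hlen : ((List.range rows).map (pvRow kb cols)).length = rows := by simp
  have hinner : (List.range rows).foldl (fun acc row =>
        if row < ((List.range rows).map (pvRow kb cols)).length ∧
            PySem.List.pyGetD (((List.range rows).map (pvRow kb cols)).getD row []) col ([] : List Char) ≠ []
        then acc ++ PySem.List.pyGetD (((List.range rows).map (pvRow kb cols)).getD row []) col ([] : List Char)
        else acc) acc
      = acc ++ (List.range rows).flatMap (fun r => pvCell kb cols r c) := by
    refine (PySem.List.foldl_congr_mem _ _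
        (fun acc row => acc ++ pvCell kb cols row c) _ ?_).trans
      (PySem.List.foldl_append_eq_flatMap _ _ _)
    intro acc' row hrow
    show _ = acc' ++ pvCell kb cols row c
    have hrlt : row < rows := List.mem_range.mp hrow
    have hgetD : (List.map (pvRow kb cols) (List.range rows)).getD row [] = pvRow kb cols row :=
      PySem.List.getD_map_range _ _ _ _ hrlt
    have hcell : PySem.List.pyGetD (pvRow kb cols row) col ([] : List Char)
        = pvCell kb cols row c := by
      rw [PySem.List.pyGetD_eq_getElem _ _ hc0 (by simp [pvRow]; omega)]
      simp only [pvRow, List.getElem_map, List.getElem_range]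
      rw [hcdef]
    simp only [hgetD, hcell, hlen]
    by_cases hnil : pvCell kb cols row c = []
    · rw [if_neg (by simp [hnil]), hnil, List.append_nil]
    · rw [if_pos ⟨hrlt, hnil⟩]
  rw [hinner, pv_colA_eq kb cols c hcols hclt]
  have hcol_cast : col = ((c : Nat) : Int) := by rw [hcdef, Int.toNat_of_nonneg hc0]
  rw [hcol_cast, pv_slice_col kb c cols hcols, Option.getD_some]
  apply congrArg (acc ++ ·)
  apply List.map_congr_left
  intro r hr
  rw [Nat.mul_comm, Nat.add_comm]
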